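-- pv_equiv track=rewrite | github.com/luisconceicaodev/University-Projects | Programação II/TPC2_48303.py | participacoes
-- ===== SOURCE A (Python) =====
-- from itertools import groupby
--
-- def participacoes(dados):
--     """
--     Cria uma lista com o número de participações dos atletas.
--     Requires: dados é uma lista de tuplos com informações de atletas
--     Ensures: Retorna uma lista com a quantidade de participações
--     de cada atleta organizada por ordem alfabética
--
--     O(n*log(n)), onde n representa a quantidade de atletas presentes na
--     lista de tuplos (dados) uma vez que esta função recorre ao metodo .sort()
--
--     Características e regiões:
--     -lista de tuplos vazia: True, False
--     -nº de atletas diferentes na lista de tuplos: 0, 1, 2, 3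
--     -nº de repetições de um atleta: 0, >1
--
--     >>> participacoes([]) #True, 0, 0
--     []
--     >>> participacoes([('Ana', 'Lisboa', 42195, '10-18', 2224)]) #False, 1, 0
--     [1]
--     >>> participacoes([('Ana', 'Lisboa', 42195, '10-18', 2224), \
--     ('Eva', 'Nova Iorque', 42195, '06-13', 2319)]) #False, 2, 0
--     [1, 1]
--     >>> participacoes([('Ana', 'Lisboa', 42195, '10-18', 2224), \
--     ('Eva', 'Nova Iorque', 42195, '06-13', 2319), \
--     ('Dulce', 'Toquio', 42195, '02-22', 2449)]) #False, 3, 0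
--     [1, 1, 1]
--     >>> participacoes([('Ana', 'Lisboa', 42195, '10-18', 2224), \
--     ('Eva', 'Nova Iorque', 42195, '06-13', 2319), \
--     ('Ana', 'Toquio', 42195, '02-22', 2403)]) #False, 2, >1
--     [2, 1]
--     >>> participacoes([('Ana', 'Lisboa', 42195, '10-18', 2224), \
--     ('Eva', 'Nova Iorque', 42195, '06-13', 2319), \
--     ('Ana', 'Toquio', 42195, '02-22', 2403), \
--     ('Eva', 'Sao Paulo', 21098, '04-12', 1182), \
--     ('Ana', 'Sao Paulo', 21098, '04-12', 1096), \
--     ('Dulce', 'Toquio', 42195, '02-22', 2449), \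
--     ('Ana', 'Boston', 42195, '04-20', 2187)]) #False, 3, >1
--     [4, 1, 2]
--     """
--     ciclo = 0
--     nomes = []
--     while ciclo in range(0, len(dados)):
--         nomes.append(dados[ciclo][0])
--         ciclo += 1
--     nomes.sort()
--     return [len(list(group)) for key, group in groupby(nomes)]
-- ===== SOURCE B (Python) =====
-- def participacoes(dados):
--     counts = {}
--     for t in dados:
--         counts[t[0]] = counts.get(t[0], 0) + 1
--     return [counts[name] for name in sorted(counts)]
-- ===== Notes on version B (the rewrite author's own statement) =====
-- stated objective: idiomatic
-- what changed: B builds a name->count dictionary in one pass and sorts only the distinct names, instead of copying all names via an index loop, sorting the whole list and measuring groupby run lengths.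
import Mathlib
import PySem

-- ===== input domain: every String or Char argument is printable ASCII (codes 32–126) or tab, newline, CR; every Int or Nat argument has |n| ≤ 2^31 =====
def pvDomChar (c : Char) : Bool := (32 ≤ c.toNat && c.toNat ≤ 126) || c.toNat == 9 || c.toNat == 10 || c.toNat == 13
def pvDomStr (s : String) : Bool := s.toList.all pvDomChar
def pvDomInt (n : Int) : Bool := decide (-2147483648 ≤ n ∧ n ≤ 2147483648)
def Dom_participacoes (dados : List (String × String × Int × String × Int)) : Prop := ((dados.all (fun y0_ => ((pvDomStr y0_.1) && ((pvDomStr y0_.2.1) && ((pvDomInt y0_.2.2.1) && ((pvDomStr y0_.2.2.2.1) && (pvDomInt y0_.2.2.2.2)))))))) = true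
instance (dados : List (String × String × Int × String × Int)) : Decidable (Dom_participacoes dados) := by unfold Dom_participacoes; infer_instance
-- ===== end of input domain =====

-- B builds a name->count dictionary in one pass and sorts only the distinct names,
-- instead of copying all names via an index loop, sorting them all and measuring groupby run lengths (idiomatic).


-- ===== PORT A =====
-- itertools.groupby run scanner: length of the leading run equal to x, and the rest
def pvRunLen (x : String) : List String → Nat × List String
  | [] => (0, [])
  | y :: ys => if y = x then let p := pvRunLen x ys; (p.1 + 1, p.2) else (0, y :: ys)

theorem pvRunLen_snd_length_le (x : String) : ∀ l : List String, (pvRunLen x l).2.length ≤ l.length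
  | [] => le_refl _
  | y :: ys => by
    simp only [pvRunLen]
    split
    · exact le_trans (pvRunLen_snd_length_le x ys) (Nat.le_succ _)
    · exact le_refl _

-- [len(list(group)) for key, group in groupby(nomes)]
def pvGroupLens : List String → List Int
  | [] => []
  | x :: xs => ((pvRunLen x xs).1 + 1 : Int) :: pvGroupLens (pvRunLen x xs).2
termination_by s => s.length
decreasing_by
  simp only [List.length_cons]
  exact Nat.lt_succ_of_le (pvRunLen_snd_length_le x xs)

def participacoes (dados : List (String × String × Int × String × Int)) : List Int :=
  -- ciclo = 0; nomes = []; while ciclo in range(0, len(dados)): nomes.append(dados[ciclo][0]); ciclo += 1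
  let nomes := (PySem.List.pyRange 0 (PySem.List.len dados)).foldl
    (fun nomes ciclo => nomes ++ [(PySem.List.pyGetD dados ciclo ("", "", 0, "", 0)).1]) []
  -- nomes.sort()
  let nomes := PySem.List.sorted nomes (fun x => x)
  pvGroupLens nomes

-- ===== PORT B =====
def participacoes_alt (dados : List (String × String × Int × String × Int)) : List Int :=
  -- counts = {}; for t in dados: counts[t[0]] = counts.get(t[0], 0) + 1
  let counts := dados.foldl (fun d t => d.insert t.1 (d.getD t.1 0 + 1)) PySem.Dict.empty
  -- [counts[name] for name in sorted(counts)]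
  (PySem.List.sorted counts.keys (fun x => x)).map (fun name => counts.getD name 0)

-- ===== PRECONDITION & SPEC =====
def Spec_participacoes (dados : List (String × String × Int × String × Int)) (out : List Int) : Prop := out = participacoes_alt dados
instance (dados : List (String × String × Int × String × Int)) (out : List Int) : Decidable (Spec_participacoes dados out) := by unfold Spec_participacoes; infer_instance

-- ===== CLAIM (what is proved, stated in full; the proofs are below) =====
def Claim_equal_participacoes : Prop := ∀ (dados : List (String × String × Int × String × Int)), Dom_participacoes dados → Spec_participacoes dados (participacoes dados)

-- ===== LEMMAS AND PROOFS =====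

-- the distinct group keys, in the order groupby visits them
def pvHeads : List String → List String
  | [] => []
  | x :: xs => x :: pvHeads (pvRunLen x xs).2
termination_by s => s.length
decreasing_by
  simp only [List.length_cons]
  exact Nat.lt_succ_of_le (pvRunLen_snd_length_le x xs)

theorem pvRunLen_sorted (x : String) (xs : List String)
    (h : (x :: xs).Pairwise (· ≤ ·)) :
    pvRunLen x xs = (xs.count x, xs.filter (fun y => y ≠ x)) := by
  induction xs with
  | nil => simp [pvRunLen]
  | cons y ys ih =>
    rcases List.pairwise_cons.mp h with ⟨hx, hys⟩
    rcases List.pairwise_cons.mp hys with ⟨hy, hys'⟩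
    by_cases hyx : y = x
    · subst hyx
      have hih : (y :: ys).Pairwise (· ≤ ·) := List.pairwise_cons.mpr ⟨hy, hys'⟩
      simp [pvRunLen, ih hih]

    · -- y ≠ x and sorted ⇒ x does not occur in y :: ys
      have hxy : x ≤ y := hx y (by simp)
      have hnot : x ∉ y :: ys := by
        intro hmem
        rcases List.mem_cons.mp hmem with h1 | h2
        · exact hyx h1.symm
        · exact hyx (le_antisymm (hy x h2) hxy)
      have hc : (y :: ys).count x = 0 := List.count_eq_zero.mpr hnot
      have hf : (y :: ys).filter (fun y => y ≠ x) = y :: ys :=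
        List.filter_eq_self.mpr (by
          intro a ha
          simp only [ne_eq, decide_eq_true_eq]
          intro hax; exact hnot (hax ▸ ha))
      simp only [pvRunLen, if_neg hyx]
      rw [hc, hf]

theorem pvRest_sorted (x : String) (xs : List String)
    (h : (x :: xs).Pairwise (· ≤ ·)) :
    (xs.filter (fun y => y ≠ x)).Pairwise (· ≤ ·) :=
  (List.pairwise_cons.mp h).2.filter _

theorem pvMem_heads (s : List String) (hs : s.Pairwise (· ≤ ·)) (k : String) :
    k ∈ pvHeads s ↔ k ∈ s := by
  induction s using pvHeads.induct with
  | case1 => simp [pvHeads]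
  | case2 x xs ih =>
    rw [pvHeads]
    rw [pvRunLen_sorted x xs hs]
    rw [pvRunLen_sorted x xs hs] at ih
    have ihr := ih (pvRest_sorted x xs hs)
    rw [List.mem_cons, List.mem_cons, ihr]
    constructor
    · rintro (h | h)
      · exact Or.inl h
      · exact Or.inr (List.mem_of_mem_filter h)
    · rintro (h | h)
      · exact Or.inl h
      · by_cases hkx : k = x
        · exact Or.inl hkx
        · exact Or.inr (List.mem_filter.mpr ⟨h, by simpa using hkx⟩)

theorem pvHeads_pairwise_lt (s : List String) (hs : s.Pairwise (· ≤ ·)) :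
    (pvHeads s).Pairwise (· < ·) := by
  induction s using pvHeads.induct with
  | case1 => simp [pvHeads]
  | case2 x xs ih =>
    rw [pvHeads]
    rw [pvRunLen_sorted x xs hs]
    rw [pvRunLen_sorted x xs hs] at ih
    have hrest := pvRest_sorted x xs hs
    refine List.pairwise_cons.mpr ⟨?_, ih hrest⟩
    intro y hy
    have hyf : y ∈ xs.filter (fun y => y ≠ x) := (pvMem_heads _ hrest y).mp hy
    have hyne : y ≠ x := by
      have := (List.mem_filter.mp hyf).2
      simpa using this
    have hle : x ≤ y :=
      (List.pairwise_cons.mp hs).1 y (List.mem_of_mem_filter hyf)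
    exact lt_of_le_of_ne hle (Ne.symm hyne)

theorem pvGroupLens_eq_map (s : List String) (hs : s.Pairwise (· ≤ ·)) :
    pvGroupLens s = (pvHeads s).map (fun k => ((s.count k : Nat) : Int)) := by
  induction s using pvHeads.induct with
  | case1 => simp [pvGroupLens, pvHeads]
  | case2 x xs ih =>
    rw [pvGroupLens, pvHeads]
    rw [pvRunLen_sorted x xs hs]
    rw [pvRunLen_sorted x xs hs] at ih
    have hrest := pvRest_sorted x xs hs
    have hih := ih hrest
    simp only [List.map_cons, hih]
    congr 1
    · rw [List.count_cons_self]
      push_cast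
      ring
    · apply List.map_congr_left
      intro k hk
      have hkf : k ∈ xs.filter (fun y => y ≠ x) := (pvMem_heads _ hrest k).mp hk
      have hkne : k ≠ x := by
        have := (List.mem_filter.mp hkf).2
        simpa using this
      have h1 : (x :: xs).count k = xs.count k := by
        simp [Ne.symm hkne]
      have h2 : (xs.filter (fun y => y ≠ x)).count k = xs.count k := by
        rw [List.count_filter]
        simp [hkne]
      rw [h1, h2]

-- A's index loop collects exactly the first components of dados
theorem pvNomes_eq_map (dados : List (String × String × Int × String × Int)) :
    (PySem.List.pyRange 0 (PySem.List.len dados)).foldl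
      (fun nomes ciclo => nomes ++ [(PySem.List.pyGetD dados ciclo ("", "", 0, "", 0)).1]) []
    = dados.map (·.1) := by
  rw [PySem.List.foldl_append_singleton_eq_map]
  have : (PySem.List.pyRange 0 (PySem.List.len dados)).map
      (fun ciclo => (PySem.List.pyGetD dados ciclo ("", "", 0, "", 0)).1)
    = ((PySem.List.pyRange 0 (PySem.List.len dados)).map
        (fun ciclo => PySem.List.pyGetD dados ciclo ("", "", 0, "", 0))).map (·.1) := by
    rw [List.map_map]; rfl
  rw [this, PySem.List.map_pyGetD_pyRange_zero]
  simp

-- ===== VERDICT (by name: the statement is the Claim_ definition above) =====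
theorem participacoes_spec : Claim_equal_participacoes := by
  intro dados _
  unfold Spec_participacoes participacoes participacoes_alt
  simp only
  rw [pvNomes_eq_map]
  have hfold : dados.foldl (fun d t => d.insert t.1 (d.getD t.1 0 + 1)) PySem.Dict.empty
      = PySem.Dict.counter (dados.map (·.1)) := by
    rw [← PySem.Dict.foldl_insert_getD_add_one_eq_counter, List.foldl_map]
  rw [hfold, PySem.Dict.keys_counter]
  have hs : (PySem.List.sorted (dados.map (·.1)) (fun x => x)).Pairwise (· ≤ ·) :=
    PySem.List.sorted_pairwise _ _
  set ns := dados.map (·.1) with hns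
  set s := PySem.List.sorted ns (fun x => x) with hsdef
  have hperm : s.Perm ns := PySem.List.sorted_perm _ _ _
  have hlt := pvHeads_pairwise_lt s hs
  have hnodup : (pvHeads s).Nodup := hlt.imp (fun h => ne_of_lt h)
  have hpermh : (pvHeads s).Perm (PySem.Set.ofList ns) := by
    rw [List.perm_ext_iff_of_nodup hnodup (PySem.Set.nodup_ofList ns)]
    intro k
    rw [pvMem_heads s hs k, PySem.Set.mem_ofList]
    exact hperm.mem_iff
  have hsorted : PySem.List.sorted (PySem.Set.ofList ns) (fun x => x) = pvHeads s :=
    PySem.List.sorted_eq_of_perm_of_pairwise_lt _ _ _ hpermh hlt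
  rw [hsorted, pvGroupLens_eq_map s hs]
  apply List.map_congr_left
  intro k _
  rw [PySem.Dict.getD_counter, hperm.count_eq]
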